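-- pv_equiv track=rewrite | github.com/loganchoi/Programming-Languages-and-Translators | 1. Lexical Analyzer State Machine/lexer.py | scientific
-- ===== SOURCE A (Python) =====
-- def scientific(case):
--     digits = ['0','1','2','3','4','5','6','7','8','9']
--     zero = ['0']
--     sign = ['-','+']
--     dec = ['.']
--     exp = ['E']
--     state = 0
--
--     for s in case:
--         if state == 0:
--             if s in sign:
--                 state = 1
--             elif s in digits:
--                 state = 2
--             else:
--                 return False
--         elif state == 1:
--             if s in digits:
--                 state = 2
--             else:
--                 return False
--         elif state == 2:
--             if s in digits:
--                 state = 2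
--             elif s in dec:
--                 state = 3
--             else:
--                 return False
--         elif state == 3:
--             if s in digits:
--                 state = 4
--             else:
--                 return False
--         elif state == 4:
--             if s in digits:
--                 state = 4
--             elif s in exp:
--                 state = 5
--             else:
--                 return False
--         elif state == 5:
--             if s in sign:
--                 state = 6
--             elif s in zero:
--                 state = 7
--             elif s in digits:
--                 state = 8
--             else:
--                 return False
--         elif state == 6:
--             if s in zero:
--                 state = 7
--             elif s in digits:
--                 state = 8
--             else:
--                 return False
--         elif state == 7:
--             if s in zero:
--                 state = 7
--             elif s in digits:
--                 state = 8
--             else: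
--                 return False
--         elif state == 8:
--             if s in digits:
--                 state = 8
--             else:
--                 return False
--     if state == 8:
--         return True
--     else:
--         return False
-- ===== SOURCE B (Python) =====
-- def scientific(case):
--     # structural parse: strip sign, split on '.' then 'E', check the three digit groups
--     if case[:1] in ('+', '-'):
--         case = case[1:]
--     ip, dot, rest = case.partition('.')
--     fp, e, ex = rest.partition('E')
--     if not (dot and e and ip.isdigit() and fp.isdigit()):
--         return False
--     if ex[:1] in ('+', '-'):
--         ex = ex[1:]
--     return ex.isdigit() and any(c != '0' for c in ex)
-- ===== Notes on version B (the rewrite author's own statement) =====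
-- stated objective: simpler
-- what changed: A's hand-written 9-state DFA loop over the characters is replaced by a direct structural parse: strip an optional sign, partition on the decimal point and then on the exponent marker, and check that the three pieces are digit groups with the exponent (after its optional sign) not all zeros.
import Mathlib
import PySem

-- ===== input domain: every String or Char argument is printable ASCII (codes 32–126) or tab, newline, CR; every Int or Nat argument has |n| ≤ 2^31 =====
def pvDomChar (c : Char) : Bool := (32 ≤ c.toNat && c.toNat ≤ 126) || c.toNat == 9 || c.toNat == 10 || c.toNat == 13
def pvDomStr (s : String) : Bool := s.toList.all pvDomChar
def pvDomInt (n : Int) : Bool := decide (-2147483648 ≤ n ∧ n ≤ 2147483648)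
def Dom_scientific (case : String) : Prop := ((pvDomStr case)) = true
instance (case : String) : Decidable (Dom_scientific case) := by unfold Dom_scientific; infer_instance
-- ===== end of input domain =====

-- B replaces A's 9-state DFA loop by a structural parse (sign strip, partition at the decimal point and exponent marker, digit-group checks); same return value.

-- ===== PORT A =====
def pvDigits : List Char := ['0','1','2','3','4','5','6','7','8','9']
def pvZero : List Char := ['0']
def pvSign : List Char := ['-','+']
def pvDec : List Char := ['.']
def pvExp : List Char := ['E']
def scientificGo : Int → List Char → Bool
  | state, [] => state == 8
  | state, s :: rest =>
    if state == 0 then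
      if pvSign.contains s then scientificGo 1 rest
      else if pvDigits.contains s then scientificGo 2 rest
      else false
    else if state == 1 then
      if pvDigits.contains s then scientificGo 2 rest
      else false
    else if state == 2 then
      if pvDigits.contains s then scientificGo 2 rest
      else if pvDec.contains s then scientificGo 3 rest
      else false
    else if state == 3 then
      if pvDigits.contains s then scientificGo 4 rest
      else false
    else if state == 4 then
      if pvDigits.contains s then scientificGo 4 rest
      else if pvExp.contains s then scientificGo 5 rest
      else false
    else if state == 5 then
      if pvSign.contains s then scientificGo 6 rest
      else if pvZero.contains s then scientificGo 7 rest
      else if pvDigits.contains s then scientificGo 8 rest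
      else false
    else if state == 6 then
      if pvZero.contains s then scientificGo 7 rest
      else if pvDigits.contains s then scientificGo 8 rest
      else false
    else if state == 7 then
      if pvZero.contains s then scientificGo 7 rest
      else if pvDigits.contains s then scientificGo 8 rest
      else false
    else if state == 8 then
      if pvDigits.contains s then scientificGo 8 rest
      else false
    else scientificGo state rest


def scientific (case : String) : Bool := scientificGo 0 case.toList


-- ===== PORT B =====
def pvPartition (sep : Char) : List Char → Option (List Char × List Char)
  | [] => none
  | c :: r =>
    if c == sep then some ([], r)
    else match pvPartition sep r with
         | some (p, q) => some (c :: p, q)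
         | none => none

def pvStripSign (l : List Char) : List Char :=
  match l with
  | c :: r => if c == '+' || c == '-' then r else c :: r
  | [] => []

def scientific_alt (case : String) : Bool :=
  let l := pvStripSign case.toList
  match pvPartition '.' l with
  | none => false
  | some (ip, rest) =>
    match pvPartition 'E' rest with
    | none => false
    | some (fp, ex) =>
      if PySem.Chars.strIsdigit ip && PySem.Chars.strIsdigit fp then
        let ex' := pvStripSign ex
        PySem.Chars.strIsdigit ex' && ex'.any (fun c => c != '0')
      else false


-- ===== PRECONDITION & SPEC =====
def Spec_scientific (case : String) (out : Bool) : Prop := out = scientific_alt case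
instance (case : String) (out : Bool) : Decidable (Spec_scientific case out) := by unfold Spec_scientific; infer_instance

-- ===== CLAIM (what is proved, stated in full; the proofs are below) =====
def Claim_equal_scientific : Prop := ∀ (case : String), Dom_scientific case → Spec_scientific case (scientific case)

-- ===== LEMMAS AND PROOFS =====

lemma pv_char_inj (a b : Char) (h : a.toNat = b.toNat) : a = b := by
  rcases a with ⟨⟨⟨a,ha⟩⟩,va⟩; rcases b with ⟨⟨⟨b,hb⟩⟩,vb⟩
  simp_all [Char.toNat, UInt32.toNat, BitVec.toNat]

lemma pv_dig_eq (c : Char) : decide (c ∈ pvDigits) = PySem.Chars.isdigit c := by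
  rw [Bool.eq_iff_iff]
  simp only [pvDigits, PySem.Chars.isdigit, List.mem_cons,
    List.not_mem_nil, or_false, Bool.and_eq_true, decide_eq_true_eq]
  constructor
  · rintro (rfl|rfl|rfl|rfl|rfl|rfl|rfl|rfl|rfl|rfl) <;> exact ⟨by decide, by decide⟩
  · rintro ⟨h1, h2⟩
    have a1 : 48 ≤ c.toNat := h1
    have a2 : c.toNat ≤ 57 := h2
    have hc : c.toNat = 48 ∨ c.toNat = 49 ∨ c.toNat = 50 ∨ c.toNat = 51 ∨ c.toNat = 52 ∨
        c.toNat = 53 ∨ c.toNat = 54 ∨ c.toNat = 55 ∨ c.toNat = 56 ∨ c.toNat = 57 := by omega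
    rcases hc with h|h|h|h|h|h|h|h|h|h
    · exact Or.inl (pv_char_inj _ _ h)
    · exact Or.inr (Or.inl (pv_char_inj _ _ h))
    · exact Or.inr (Or.inr (Or.inl (pv_char_inj _ _ h)))
    · exact Or.inr (Or.inr (Or.inr (Or.inl (pv_char_inj _ _ h))))
    · exact Or.inr (Or.inr (Or.inr (Or.inr (Or.inl (pv_char_inj _ _ h)))))
    · exact Or.inr (Or.inr (Or.inr (Or.inr (Or.inr (Or.inl (pv_char_inj _ _ h))))))
    · exact Or.inr (Or.inr (Or.inr (Or.inr (Or.inr (Or.inr (Or.inl (pv_char_inj _ _ h)))))))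
    · exact Or.inr (Or.inr (Or.inr (Or.inr (Or.inr (Or.inr (Or.inr (Or.inl (pv_char_inj _ _ h))))))))
    · exact Or.inr (Or.inr (Or.inr (Or.inr (Or.inr (Or.inr (Or.inr (Or.inr (Or.inl (pv_char_inj _ _ h)))))))))
    · exact Or.inr (Or.inr (Or.inr (Or.inr (Or.inr (Or.inr (Or.inr (Or.inr (Or.inr (pv_char_inj _ _ h)))))))))

lemma pv_go8 : ∀ l, scientificGo 8 l = l.all (pvDigits.contains ·)
  | [] => by simp [scientificGo]
  | c :: r => by
    by_cases h : c ∈ pvDigits <;> simp [scientificGo, h, pv_go8 r]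

lemma pv_go7 : ∀ l, scientificGo 7 l = (l.all (pvDigits.contains ·) && l.any (fun c => c != '0'))
  | [] => by simp [scientificGo]
  | c :: r => by
    by_cases hz : c = '0'
    · subst hz
      simp [scientificGo, pv_go7 r, pvZero, pvDigits]
    · have hz' : c ∉ pvZero := by simp [pvZero, hz]
      by_cases h : c ∈ pvDigits <;> simp [scientificGo, h, hz', hz, pv_go8 r]

lemma pv_go6 (l : List Char) :
    scientificGo 6 l = (l.all (pvDigits.contains ·) && l.any (fun c => c != '0')) := by
  cases l with
  | nil => simp [scientificGo]
  | cons c r =>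
    by_cases hz : c = '0'
    · subst hz
      simp [scientificGo, pv_go7 r, pvZero, pvDigits]
    · have hz' : c ∉ pvZero := by simp [pvZero, hz]
      by_cases h : c ∈ pvDigits <;> simp [scientificGo, h, hz', hz, pv_go8 r]


def pvExpOK (l : List Char) : Bool :=
  PySem.Chars.strIsdigit (pvStripSign l) && (pvStripSign l).any (fun c => c != '0')

lemma pv_go5 (l : List Char) : scientificGo 5 l = pvExpOK l := by
  cases l with
  | nil => simp [scientificGo, pvExpOK, pvStripSign, PySem.Chars.strIsdigit]
  | cons c r =>
    by_cases hs : c ∈ pvSign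
    · have hs' : (c == '+' || c == '-') = true := by
        rcases (show c = '-' ∨ c = '+' by simpa [pvSign] using hs) with rfl | rfl <;> rfl
      have hns : c ∉ pvDigits := by
        rcases (show c = '-' ∨ c = '+' by simpa [pvSign] using hs) with rfl | rfl <;> decide
      simp only [scientificGo, pvExpOK, pvStripSign, hs']
      simp [hs, pv_go6 r, PySem.Chars.strIsdigit, pv_dig_eq]
      cases r <;> simp [Bool.and_assoc]
    · have hs' : (c == '+' || c == '-') = false := by
        simp [pvSign] at hs
        simp [hs.1, hs.2]
      by_cases hz : c = '0'
      · subst hz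
        simp only [scientificGo, pvExpOK, pvStripSign, hs']
        simp [pvSign, pvZero, pv_go7 r, PySem.Chars.strIsdigit, pv_dig_eq, Bool.and_assoc]
        intros; decide
      · have hz' : c ∉ pvZero := by simp [pvZero, hz]
        by_cases h : c ∈ pvDigits
        · have hd : PySem.Chars.isdigit c = true := by rw [← pv_dig_eq]; simp [h]
          have hne : (c != '0') = true := by simp [hz]
          simp only [scientificGo, pvExpOK, pvStripSign, hs']
          simp [hs, hz', h, pv_go8 r, PySem.Chars.strIsdigit, pv_dig_eq, hd, hne]
        · have hd : PySem.Chars.isdigit c = false := by rw [← pv_dig_eq]; simp [h]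
          simp only [scientificGo, pvExpOK, pvStripSign, hs']
          simp [hs, hz', h, PySem.Chars.strIsdigit, hd]

lemma pv_go4 : ∀ l, scientificGo 4 l = (match pvPartition 'E' l with
      | some (ds, ex) => ds.all (pvDigits.contains ·) && pvExpOK ex
      | none => false)
  | [] => by simp [scientificGo, pvPartition]
  | c :: r => by
    by_cases hE : c = 'E'
    · subst hE
      simp [scientificGo, pvPartition, pvExp, pvDigits, pv_go5 r]
    · by_cases h : c ∈ pvDigits
      · have hx : c ∉ pvExp := by simp [pvExp, hE]
        rw [show scientificGo 4 (c :: r) = scientificGo 4 r by simp [scientificGo, h]]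
        rw [pv_go4 r]
        cases hp : pvPartition 'E' r with
        | none => simp [pvPartition, hE, hp]
        | some pq => cases pq with
          | mk p q => simp [pvPartition, hE, hp, h]
      · have hx : c ∉ pvExp := by simp [pvExp, hE]
        rw [show scientificGo 4 (c :: r) = false by simp [scientificGo, h, hx]]
        cases hp : pvPartition 'E' r with
        | none => simp [pvPartition, hE, hp]
        | some pq => cases pq with
          | mk p q => simp [pvPartition, hE, hp, h]

lemma pv_go3 (l : List Char) :
    scientificGo 3 l = (match pvPartition 'E' l with
      | some (fp, ex) => PySem.Chars.strIsdigit fp && pvExpOK ex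
      | none => false) := by
  cases l with
  | nil => simp [scientificGo, pvPartition]
  | cons c r =>
    by_cases hE : c = 'E'
    · subst hE
      simp [scientificGo, pvPartition, pvDigits, PySem.Chars.strIsdigit]
    · by_cases h : c ∈ pvDigits
      · have hd : PySem.Chars.isdigit c = true := by rw [← pv_dig_eq]; simp [h]
        rw [show scientificGo 3 (c :: r) = scientificGo 4 r by simp [scientificGo, h]]
        rw [pv_go4 r]
        cases hp : pvPartition 'E' r with
        | none => simp [pvPartition, hE, hp]
        | some pq => cases pq with
          | mk p q =>
            simp [pvPartition, hE, hp, PySem.Chars.strIsdigit, hd, pv_dig_eq]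
      · have hd : PySem.Chars.isdigit c = false := by rw [← pv_dig_eq]; simp [h]
        rw [show scientificGo 3 (c :: r) = false by simp [scientificGo, h]]
        cases hp : pvPartition 'E' r with
        | none => simp [pvPartition, hE, hp]
        | some pq => cases pq with
          | mk p q => simp [pvPartition, hE, hp, PySem.Chars.strIsdigit, hd]

lemma pv_go2 : ∀ l, scientificGo 2 l = (match pvPartition '.' l with
      | some (ip, rest) => ip.all (pvDigits.contains ·) && scientificGo 3 rest
      | none => false)
  | [] => by simp [scientificGo, pvPartition]
  | c :: r => by
    by_cases hD : c = '.'
    · subst hD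
      simp [scientificGo, pvPartition, pvDec, pvDigits]
    · by_cases h : c ∈ pvDigits
      · rw [show scientificGo 2 (c :: r) = scientificGo 2 r by simp [scientificGo, h]]
        rw [pv_go2 r]
        cases hp : pvPartition '.' r with
        | none => simp [pvPartition, hD, hp]
        | some pq => cases pq with
          | mk p q => simp [pvPartition, hD, hp, h]
      · have hx : c ∉ pvDec := by simp [pvDec, hD]
        rw [show scientificGo 2 (c :: r) = false by simp [scientificGo, h, hx]]
        cases hp : pvPartition '.' r with
        | none => simp [pvPartition, hD, hp]
        | some pq => cases pq with
          | mk p q => simp [pvPartition, hD, hp, h]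

lemma pv_go0 (l : List Char) :
    scientificGo 0 l = (match pvStripSign l with
      | c :: r => pvDigits.contains c && scientificGo 2 r
      | [] => false) := by
  cases l with
  | nil => simp [scientificGo, pvStripSign]
  | cons c r =>
    by_cases hs : c ∈ pvSign
    · have hs' : (c == '+' || c == '-') = true := by
        rcases (show c = '-' ∨ c = '+' by simpa [pvSign] using hs) with rfl | rfl <;> rfl
      rw [show scientificGo 0 (c :: r) = scientificGo 1 r by simp [scientificGo, hs]]
      simp only [pvStripSign, hs']
      cases r with
      | nil => simp [scientificGo]
      | cons d r' =>
        by_cases h : d ∈ pvDigits <;> simp [scientificGo, h]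
    · have hs' : (c == '+' || c == '-') = false := by
        simp [pvSign] at hs
        simp [hs.1, hs.2]
      simp only [pvStripSign, hs']
      by_cases h : c ∈ pvDigits <;> simp [scientificGo, hs, h]

lemma pv_main (case : String) : scientific case = scientific_alt case := by
  unfold scientific scientific_alt
  rw [pv_go0]
  cases hm : pvStripSign case.toList with
  | nil => simp [pvPartition]
  | cons c r =>
    simp only []
    show (pvDigits.contains c && scientificGo 2 r) = _
    rw [pv_go2 r]
    by_cases hD : c = '.'
    · subst hD
      simp [pvPartition, pvDigits, PySem.Chars.strIsdigit]
      cases pvPartition 'E' r with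
      | none => rfl
      | some fe => cases fe with | mk fp ex => rfl
    · cases hp : pvPartition '.' r with
      | none => simp [pvPartition, hD, hp]
      | some pq =>
        cases pq with
        | mk ip rest =>
          simp only [pv_go3 rest]
          cases hq : pvPartition 'E' rest with
          | none => simp [pvPartition, hD, hp, hq]
          | some fe =>
            cases fe with
            | mk fp ex =>
              simp only [pvPartition, hD, hp, hq]
              by_cases h : c ∈ pvDigits
              · have hd : PySem.Chars.isdigit c = true := by rw [← pv_dig_eq]; simp [h]
                simp [h, hD, hq, PySem.Chars.strIsdigit, hd, pv_dig_eq, pvExpOK, Bool.and_assoc]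
                rw [Bool.eq_iff_iff]
                simp [List.isEmpty_iff]
              · have hd : PySem.Chars.isdigit c = false := by rw [← pv_dig_eq]; simp [h]
                simp [h, hD, hq, PySem.Chars.strIsdigit, hd]

-- ===== VERDICT (by name: the statement is the Claim_ definition above) =====
theorem scientific_spec : Claim_equal_scientific := by
  intro case _
  exact pv_main case
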